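-- pv_equiv track=rewrite | github.com/KongphopTongdee/Leetcode_Practices | EasyCode/268_MissingNumber.py | genCorrectAns
-- ===== SOURCE A (Python) =====
-- def genCorrectAns( inputArray ):
--     copyInputArray = inputArray.copy()
--     copyInputArray.sort()
--     outputArray = []
--
--     for num in range( copyInputArray[ len( copyInputArray ) - 1 ] ):
--         outputArray.append( num )
--
--     outputArray.append( copyInputArray[ len( copyInputArray ) - 1 ] )
--
--     return outputArray
-- ===== SOURCE B (Python) =====
-- def genCorrectAns(inputArray):
--     m = inputArray[0]
--     for x in inputArray[1:]:
--         if x > m: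
--             m = x
--     return list(range(m)) + [m]
-- ===== Notes on version B (the rewrite author's own statement) =====
-- stated objective: alternative
-- what changed: Replaces the sort-then-take-last with a single linear max scan seeded at the first element, then builds range(m)+[m] directly; the scan is O(n) vs O(n log n) but total runtime is dominated by building the range, so no measured speedup.
import Mathlib
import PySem

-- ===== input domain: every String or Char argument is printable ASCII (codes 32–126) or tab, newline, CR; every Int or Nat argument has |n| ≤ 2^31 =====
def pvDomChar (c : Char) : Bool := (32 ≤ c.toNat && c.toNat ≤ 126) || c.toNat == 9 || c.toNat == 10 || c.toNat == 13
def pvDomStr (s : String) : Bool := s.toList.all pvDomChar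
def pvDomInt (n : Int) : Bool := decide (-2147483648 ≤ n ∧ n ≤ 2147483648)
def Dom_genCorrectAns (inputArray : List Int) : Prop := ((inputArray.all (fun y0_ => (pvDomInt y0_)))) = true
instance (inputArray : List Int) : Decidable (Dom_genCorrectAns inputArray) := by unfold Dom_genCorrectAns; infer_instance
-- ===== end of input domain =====

-- B replaces A's sort-then-take-last with a single linear max scan; return value only, no mutation.

-- ===== PORT A =====
-- copy + sort, index the last element, build the output by appending in a range loop
def genCorrectAns (inputArray : List Int) : List Int :=
  let copyInputArray := PySem.List.sorted inputArray (fun x => x) false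
  match PySem.List.pyGet? copyInputArray ((copyInputArray.length : Int) - 1) with
  | none => []  -- IndexError on empty input; excluded by Pre_
  | some last =>
      let outputArray : List Int := []
      let outputArray := (PySem.List.pyRange 0 last 1).foldl (fun acc num => acc ++ [num]) outputArray
      outputArray ++ [last]

-- ===== PORT B =====
-- seed m with the first element, linear scan for the max, then range(m) + [m]
def genCorrectAns_alt (inputArray : List Int) : List Int :=
  match inputArray with
  | [] => []  -- IndexError in Python; excluded by Pre_
  | h :: t =>
      let m := t.foldl (fun m x => if x > m then x else m) h
      PySem.List.pyRange 0 m 1 ++ [m]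

-- ===== PRECONDITION & SPEC =====
-- A raises IndexError on the empty list (so does B); excluded.
def Pre_genCorrectAns (inputArray : List Int) : Prop := inputArray ≠ []
instance (inputArray : List Int) : Decidable (Pre_genCorrectAns inputArray) := by unfold Pre_genCorrectAns; infer_instance
def pvWitness_genCorrectAns : List Int := [3, 1, 2]

def Spec_genCorrectAns (inputArray : List Int) (out : List Int) : Prop := out = genCorrectAns_alt inputArray
instance (inputArray : List Int) (out : List Int) : Decidable (Spec_genCorrectAns inputArray out) := by unfold Spec_genCorrectAns; infer_instance

-- ===== CLAIM (what is proved, stated in full; the proofs are below) =====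
def Claim_equal_genCorrectAns : Prop := ∀ (inputArray : List Int), Dom_genCorrectAns inputArray → Pre_genCorrectAns inputArray → Spec_genCorrectAns inputArray (genCorrectAns inputArray)

-- ===== LEMMAS AND PROOFS =====

-- the append-accumulator loop is just list append
theorem foldl_append_singleton (xs acc : List Int) :
    xs.foldl (fun a x => a ++ [x]) acc = acc ++ xs := by
  induction xs generalizing acc with
  | nil => simp
  | cons x xs ih => simp [List.foldl, ih]

-- B's scan computes an element of the list that dominates every element
theorem foldl_max_mem (t : List Int) (h : Int) :
    t.foldl (fun m x => if x > m then x else m) h ∈ h :: t := by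
  induction t generalizing h with
  | nil => simp
  | cons x xs ih =>
    simp only [List.foldl]
    rcases List.mem_cons.mp (ih (if x > h then x else h)) with hm | hm
    · rw [hm]; split_ifs <;> simp
    · simp [hm]

theorem foldl_max_ge (t : List Int) (h : Int) :
    ∀ y ∈ h :: t, y ≤ t.foldl (fun m x => if x > m then x else m) h := by
  induction t generalizing h with
  | nil => simp
  | cons x xs ih =>
    intro y hy
    simp only [List.foldl]
    have hseed : h ≤ (if x > h then x else h) ∧ x ≤ (if x > h then x else h) := by
      constructor <;> split_ifs <;> omega
    have key := ih (if x > h then x else h)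
    rcases List.mem_cons.mp hy with rfl | hy2
    · exact le_trans hseed.1 (key _ (List.mem_cons_self ..))
    rcases List.mem_cons.mp hy2 with rfl | hy3
    · exact le_trans hseed.2 (key _ (List.mem_cons_self ..))
    · exact key y (List.mem_cons_of_mem _ hy3)

theorem genCorrectAns_spec : Claim_equal_genCorrectAns := by
  intro inputArray _hdom hpre
  unfold Spec_genCorrectAns
  match hxs : inputArray with
  | [] => exact absurd rfl hpre
  | h :: t =>
    set m := t.foldl (fun m x => if x > m then x else m) h with hmdef
    -- the sorted copy is nonempty
    set s := PySem.List.sorted (h :: t) (fun x : Int => x) false with hs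
    have hsne : s ≠ [] := by
      simp [hs, PySem.List.sorted_eq_nil_iff]
    have hslen : 1 ≤ s.length := List.length_pos_iff.mpr hsne
    -- the indexed element is the last element of s
    have hidx : (s.length : Int) - 1 = ((s.length - 1 : Nat) : Int) := by omega
    have hget : PySem.List.pyGet? s ((s.length : Int) - 1) = some (s.getLast hsne) := by
      rw [hidx, PySem.List.pyGet?_natCast, List.getElem?_eq_getElem (by omega)]
      congr 1
      exact (List.getLast_eq_getElem hsne).symm
    -- the last of the sorted list equals B's max m
    have hperm : s.Perm (h :: t) := PySem.List.sorted_perm ..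
    have hlast_mem : s.getLast hsne ∈ h :: t := hperm.mem_iff.mp (List.getLast_mem hsne)
    have hpw : s.Pairwise (fun a b : Int => a ≤ b) := by
      have := PySem.List.sorted_pairwise (xs := h :: t) (key := fun x : Int => x)
      simpa using this
    have hlast_ge : ∀ y ∈ h :: t, y ≤ s.getLast hsne := by
      intro y hy
      have hy' : y ∈ s := hperm.mem_iff.mpr hy
      rcases (List.mem_iff_getElem).mp hy' with ⟨i, hi, rfl⟩
      rcases Nat.lt_or_ge i (s.length - 1) with hlt | hge
      · have := List.pairwise_iff_getElem.mp hpw i (s.length - 1) (by omega) (by omega) hlt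
        rw [List.getLast_eq_getElem hsne]
        exact this
      · have : i = s.length - 1 := by omega
        subst this
        rw [List.getLast_eq_getElem hsne]
    have heq : s.getLast hsne = m := by
      apply le_antisymm
      · exact foldl_max_ge t h _ hlast_mem
      · exact hlast_ge m (foldl_max_mem t h)
    -- assemble
    show genCorrectAns (h :: t) = genCorrectAns_alt (h :: t)
    unfold genCorrectAns genCorrectAns_alt
    simp only [← hs, hget, heq, ← hmdef]
    rw [foldl_append_singleton]
    simp

-- ===== VERDICT (by name: the statement is the Claim_ definition above) =====
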